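-- pv_equiv track=rewrite | github.com/Camila20/Gas-Station | Problema 1.py | funcion
-- ===== SOURCE A (Python) =====
-- def funcion(A,B):
--     N=len(A)
--     Ac=A[:]     # Copia de A
--     Bc=B[:]     # Copia de B
--     Tank=0
--     Requeried=0
--     i=0
--     while True:
--         try:
--             if B[i]<=A[i]:      # Si el combustible requerido es menor que el que se tiene
--                 index=i
--                 break           # No se continúa buscando una posición
--             else:               # Si el combustible requerido es mayor que el que se tiene
--                 Ac+=[Ac.pop(i)] # Se mueve el elemnto de la posición i hacia el final
--                 Bc+=[Bc.pop(i)]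
--                 i+=1
--         except IndexError:      # No hay más valores
--             index=-1            # El retorno será -1
--             return index
--             break
--     for j in range(N):          # Se completa casi una vuelta
--         Tank+=Ac[i]
--         Requeried=Bc[i]
--         Tank-=Requeried
--         if Requeried>Tank:      # Si no hay suficiente gas para avanzar se retorna -1
--             break
--             print ("error")
--     Tank+=Ac[0]
--     if Tank-Bc[0]>=0:       # Vuelta que completa el recorrido
--         index=i
--     return index            # Se retornará la posición esde la cual se empezó
-- ===== SOURCE B (Python) =====
-- def funcion(A, B):
--     # Single linear scan over the paired stations: first index where the
--     # fuel required is at most the fuel available, -1 if none.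
--     for i, (a, b) in enumerate(zip(A, B)):
--         if b <= a:
--             return i
--     return -1
-- ===== Notes on version B (the rewrite author's own statement) =====
-- stated objective: faster
-- what changed: B replaces A's rotating-copies while/try loop plus a redundant N-step tank simulation (whose result never changes the returned index) by a single enumerate-zip scan returning the first index i with B[i]<=A[i], or -1.
import Mathlib
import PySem

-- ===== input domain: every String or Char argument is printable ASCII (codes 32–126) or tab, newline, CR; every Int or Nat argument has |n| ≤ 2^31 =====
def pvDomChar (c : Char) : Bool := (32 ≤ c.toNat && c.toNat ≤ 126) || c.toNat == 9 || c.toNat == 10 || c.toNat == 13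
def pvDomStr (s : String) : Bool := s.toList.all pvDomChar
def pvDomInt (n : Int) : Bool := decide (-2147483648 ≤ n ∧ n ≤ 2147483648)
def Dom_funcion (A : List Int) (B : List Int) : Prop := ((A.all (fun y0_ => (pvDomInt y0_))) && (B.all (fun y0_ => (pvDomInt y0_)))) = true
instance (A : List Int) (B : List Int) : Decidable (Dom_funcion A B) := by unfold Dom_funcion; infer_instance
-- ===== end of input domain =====

-- B replaces A's rotating-copies while/try loop plus a redundant tank simulation
-- (which never changes the returned index) by one linear enumerate-zip scan.

-- ===== PORT A =====
-- the 'while True/try' loop: none = the except-IndexError exit (→ -1), else (index, Ac, Bc).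
-- The Nat argument is pure fuel for termination; the caller supplies len(B)+1 and i grows
-- by 1 per step while B[i] must stay in range, so fuel 0 is never reached.
def funcionFind (A B Ac Bc : List Int) (i : Nat) : Nat → Option (Nat × List Int × List Int)
  | 0 => none
  | fuel + 1 =>
    match PySem.List.pyGet? B (i : Int), PySem.List.pyGet? A (i : Int) with
    | some b, some a =>
      if b ≤ a then some (i, Ac, Bc)
      else
        match PySem.List.pop? Ac (i : Int), PySem.List.pop? Bc (i : Int) with
        | some (av, Ac'), some (bv, Bc') =>
            funcionFind A B (Ac' ++ [av]) (Bc' ++ [bv]) (i + 1) fuel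
        | _, _ => none      -- pop's IndexError is caught by the same except clause
    | _, _ => none

-- 'for j in range(N)': the index i is constant through the loop, so only Tank evolves
def funcionTank (aci bci : Int) (n : Nat) (Tank : Int) : Int :=
  match n with
  | 0 => Tank
  | Nat.succ m =>
    let T := Tank + aci - bci
    if bci > T then T else funcionTank aci bci m T

def funcion (A : List Int) (B : List Int) : Int :=
  let N := A.length
  let Ac := PySem.List.slice A none none   -- A[:]
  let Bc := PySem.List.slice B none none   -- B[:]
  match funcionFind A B Ac Bc 0 (B.length + 1) with
  | none => -1
  | some (i, Ac, Bc) =>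
    -- indices below are always in range on reachable states; getD 0 only totalises
    let Tank := funcionTank ((PySem.List.pyGet? Ac (i : Int)).getD 0)
                            ((PySem.List.pyGet? Bc (i : Int)).getD 0) N 0
    let Tank := Tank + (PySem.List.pyGet? Ac 0).getD 0
    let index : Int := i
    if Tank - (PySem.List.pyGet? Bc 0).getD 0 ≥ 0 then (i : Int) else index

-- ===== PORT B =====
def funcionScan (pairs : List (Int × Int)) (i : Nat) : Int :=
  match pairs with
  | [] => -1
  | (a, b) :: t => if b ≤ a then (i : Int) else funcionScan t (i + 1)

def funcion_alt (A : List Int) (B : List Int) : Int :=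
  funcionScan (A.zip B) 0

-- ===== PRECONDITION & SPEC =====
def Spec_funcion (A : List Int) (B : List Int) (out : Int) : Prop := out = funcion_alt A B
instance (A : List Int) (B : List Int) (out : Int) : Decidable (Spec_funcion A B out) := by unfold Spec_funcion; infer_instance

-- ===== CLAIM (what is proved, stated in full; the proofs are below) =====
def Claim_equal_funcion : Prop := ∀ (A : List Int) (B : List Int), Dom_funcion A B → Spec_funcion A B (funcion A B)

-- ===== LEMMAS AND PROOFS =====
theorem find_eq_scan (A B : List Int) : ∀ (fuel i : Nat) (Ac Bc : List Int),
    Ac.length = A.length → Bc.length = B.length → B.length < i + fuel →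
    (match funcionFind A B Ac Bc i fuel with
     | none => (-1 : Int)
     | some (j, _, _) => (j : Int))
      = funcionScan ((A.drop i).zip (B.drop i)) i := by
  intro fuel
  induction fuel with
  | zero =>
    intro i Ac Bc _ _ hfu
    have : B.length ≤ i := by omega
    rw [List.drop_eq_nil_of_le this]
    simp [funcionFind, funcionScan]
  | succ fuel ih =>
    intro i Ac Bc hAc hBc hfu
    rcases h1 : PySem.List.pyGet? B (i : Int) with _ | b
    · rw [PySem.List.pyGet?_natCast] at h1
      have hle : B.length ≤ i := List.getElem?_eq_none_iff.mp h1
      rw [List.drop_eq_nil_of_le hle]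
      simp only [funcionFind]
      rw [PySem.List.pyGet?_natCast, h1]
      simp [funcionScan]
    · rcases h2 : PySem.List.pyGet? A (i : Int) with _ | a
      · rw [PySem.List.pyGet?_natCast] at h2
        have hle : A.length ≤ i := List.getElem?_eq_none_iff.mp h2
        rw [List.drop_eq_nil_of_le hle]
        simp only [funcionFind]
        rw [h1, PySem.List.pyGet?_natCast, h2]
        simp [funcionScan]
      · rw [PySem.List.pyGet?_natCast] at h1 h2
        obtain ⟨hiB, hb⟩ := List.getElem?_eq_some_iff.mp h1
        obtain ⟨hiA, ha⟩ := List.getElem?_eq_some_iff.mp h2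
        have h3 := PySem.List.pop?_natCast (xs := Ac) (n := i) (by omega)
        have h4 := PySem.List.pop?_natCast (xs := Bc) (n := i) (by omega)
        rw [List.drop_eq_getElem_cons hiA, List.drop_eq_getElem_cons hiB]
        simp only [funcionFind, PySem.List.pyGet?_natCast, h1, h2, h3, h4]
        by_cases hba : b ≤ a
        · simp [funcionScan, ha, hb, hba]
        · rw [if_neg hba]
          rw [ih (i + 1) _ _ (by simp [List.length_eraseIdx, hAc, hiA]; omega)
                (by simp [List.length_eraseIdx, hBc, hiB]; omega) (by omega)]
          simp [funcionScan, ha, hb, hba]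

-- ===== VERDICT (by name: the statement is the Claim_ definition above) =====
theorem funcion_spec : Claim_equal_funcion := by
  intro A B _
  unfold Spec_funcion funcion_alt funcion
  simp only [PySem.List.slice_none_none]
  have h := find_eq_scan A B (B.length + 1) 0 A B rfl rfl (by omega)
  simp only [List.drop_zero] at h
  rcases hf : funcionFind A B A B 0 (B.length + 1) with _ | ⟨j, Ac, Bc⟩ <;>
    rw [hf] at h <;> simp only [← h] <;> split <;> rfl
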